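-- pv_equiv track=rewrite | github.com/Paul-Ferrell/adventofcode | 2-sonar/solution.py | rolling_sum
-- ===== SOURCE A (Python) =====
-- from typing import List
--
-- def rolling_sum(data: List[int], window_size: int = 3) -> List[int]:
--     """Return a list of rolling averages given the input file of the given window size."""
--
--     sums = []
--     windows = []
--
--     for point in data:
--         for window in windows:
--             window.append(point)
--         windows.append([point])
--
--         if len(windows[0]) == window_size:
--             sums.append(sum(windows.pop(0)))
--
--     return sums
-- ===== SOURCE B (Python) =====
-- from typing import List
--
-- def rolling_sum(data: List[int], window_size: int = 3) -> List[int]: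
--     """Return the sums of each contiguous window of the given size (prefix-sum method, O(n))."""
--     if window_size < 1 or len(data) < window_size:
--         return []
--     prefix = [0]
--     for x in data:
--         prefix.append(prefix[-1] + x)
--     return [prefix[i + window_size] - prefix[i]
--             for i in range(len(data) - window_size + 1)]
-- ===== Notes on version B (the rewrite author's own statement) =====
-- stated objective: faster
-- what changed: Replaces the list-of-growing-windows simulation (each point appended to every open window) by a one-pass prefix-sum array with each window sum computed as a difference of two prefix sums.
import Mathlib
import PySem

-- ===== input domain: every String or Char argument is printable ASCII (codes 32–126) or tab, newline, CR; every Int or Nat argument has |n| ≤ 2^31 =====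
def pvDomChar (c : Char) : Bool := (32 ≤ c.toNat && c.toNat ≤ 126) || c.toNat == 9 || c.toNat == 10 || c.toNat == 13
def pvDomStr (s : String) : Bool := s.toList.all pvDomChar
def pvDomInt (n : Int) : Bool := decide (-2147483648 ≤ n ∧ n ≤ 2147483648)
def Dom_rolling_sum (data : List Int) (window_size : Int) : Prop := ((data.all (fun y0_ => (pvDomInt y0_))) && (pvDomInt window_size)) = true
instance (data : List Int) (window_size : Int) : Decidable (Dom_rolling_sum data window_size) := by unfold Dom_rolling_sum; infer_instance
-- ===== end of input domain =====

-- B replaces A's list-of-growing-windows simulation (O(n·w)) by a one-pass prefix-sum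
-- array, each window sum being a difference of two prefix sums (O(n)).

-- ===== PORT A =====
-- one iteration of A's loop body: state = (sums, windows)
def rsStep (window_size : Int) (st : List Int × List (List Int)) (point : Int) :
    List Int × List (List Int) :=
  let windows := st.2.map (fun w => w ++ [point]) ++ [[point]]
  -- windows is never empty here, so `headD []` is exactly Python's windows[0]
  if ((windows.headD []).length : Int) = window_size then
    (st.1 ++ [(windows.headD []).sum], windows.drop 1)
  else
    (st.1, windows)

def rolling_sum (data : List Int) (window_size : Int) : List Int :=
  (data.foldl (rsStep window_size) ([], [])).1

-- ===== PORT B =====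
def rolling_sum_alt (data : List Int) (window_size : Int) : List Int :=
  if window_size < 1 ∨ (data.length : Int) < window_size then []
  else
    let pfx := data.foldl (fun acc x => acc ++ [PySem.List.pyGetD acc (-1) 0 + x]) [0]
    (PySem.List.pyRange 0 ((data.length : Int) - window_size + 1) 1).map
      (fun i => PySem.List.pyGetD pfx (i + window_size) 0 - PySem.List.pyGetD pfx i 0)

-- ===== PRECONDITION & SPEC =====
def Spec_rolling_sum (data : List Int) (window_size : Int) (out : List Int) : Prop := out = rolling_sum_alt data window_size
instance (data : List Int) (window_size : Int) (out : List Int) : Decidable (Spec_rolling_sum data window_size out) := by unfold Spec_rolling_sum; infer_instance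

-- ===== CLAIM (what is proved, stated in full; the proofs are below) =====
def Claim_equal_rolling_sum : Prop := ∀ (data : List Int) (window_size : Int), Dom_rolling_sum data window_size → Spec_rolling_sum data window_size (rolling_sum data window_size)

-- ===== LEMMAS AND PROOFS =====

-- the nonempty suffixes of a list, longest first: A's `windows` buffer
def sufs : List Int → List (List Int)
  | [] => []
  | x :: xs => (x :: xs) :: sufs xs

-- abstract form of A's loop: state = (emitted sums, window buffer contents)
def core (w : Int) : List Int → List Int → List Int → List Int
  | s, _, [] => s
  | s, t, p :: rest =>
    if ((t.length : Int) + 1 = w) then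
      core w (s ++ [(t ++ [p]).sum]) ((t ++ [p]).drop 1) rest
    else
      core w s (t ++ [p]) rest

theorem sufs_append (l : List Int) (p : Int) :
    (sufs l).map (fun w => w ++ [p]) ++ [[p]] = sufs (l ++ [p]) := by
  induction l with
  | nil => simp [sufs]
  | cons x xs ih => simp [sufs, ← ih]

theorem sufs_headD (l : List Int) : (sufs l).headD [] = l := by
  cases l <;> simp [sufs]

theorem sufs_drop_one (l : List Int) : (sufs l).drop 1 = sufs (l.drop 1) := by
  cases l <;> simp [sufs]

theorem foldA (w : Int) (data : List Int) : ∀ (s t : List Int),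
    (data.foldl (rsStep w) (s, sufs t)).1 = core w s t data := by
  induction data with
  | nil => intro s t; simp [core]
  | cons p rest ih =>
    intro s t
    have hstep : rsStep w (s, sufs t) p =
        if ((t.length : Int) + 1 = w) then
          (s ++ [(t ++ [p]).sum], sufs ((t ++ [p]).drop 1))
        else
          (s, sufs (t ++ [p])) := by
      simp only [rsStep, sufs_append, sufs_headD, sufs_drop_one]
      have : ((t ++ [p]).length : Int) = (t.length : Int) + 1 := by simp
      rw [this]
    simp only [List.foldl_cons, hstep, core]
    split <;> exact ih _ _

theorem core_neg (w : Int) (hw : w < 1) (data : List Int) : ∀ (s t : List Int),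
    core w s t data = s := by
  induction data with
  | nil => intro s t; simp [core]
  | cons p rest ih =>
    intro s t
    have : ¬ ((t.length : Int) + 1 = w) := by
      intro h; omega
    simp [core, this, ih]

theorem core_char (W : Nat) (hW : 1 ≤ W) (data : List Int) : ∀ (s t : List Int),
    t.length + 1 ≤ W →
    core (W : Int) s t data =
      s ++ (List.range (t.length + data.length + 1 - W)).map
            (fun i => (((t ++ data).drop i).take W).sum) := by
  induction data with
  | nil =>
    intro s t ht
    have h0 : t.length + 1 - W = 0 := by omega
    simp [core, h0]
  | cons p rest ih =>
    intro s t ht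
    by_cases hc : t.length + 1 = W
    · have hcond : ((t.length : Int) + 1 = (W : Int)) := by exact_mod_cast hc
      have hlen : (t ++ [p]).length = W := by simp; omega
      have hdroplen : ((t ++ [p]).drop 1).length = W - 1 := by simp; omega
      rw [core, if_pos hcond, ih _ _ (by omega)]
      have hcount : ((t ++ [p]).drop 1).length + rest.length + 1 - W = rest.length := by
        rw [hdroplen]; omega
      have hcount' : t.length + (p :: rest).length + 1 - W = rest.length + 1 := by
        simp; omega
      rw [hcount, hcount', List.range_succ_eq_map]
      have hsplit : t ++ p :: rest = (t ++ [p]) ++ rest := by simp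
      have hfirst : (((t ++ p :: rest).drop 0).take W).sum = (t ++ [p]).sum := by
        rw [hsplit, List.drop_zero, ← hlen, List.take_left]
      have hdropsplit : ∀ i : Nat,
          (t ++ p :: rest).drop (i + 1) = ((t ++ [p]).drop 1 ++ rest).drop i := by
        intro i
        rw [hsplit, Nat.add_comm i 1, ← List.drop_drop,
            List.drop_append_of_le_length (by simp)]
      rw [List.map_cons, List.map_map, List.append_assoc, List.singleton_append]
      congr 1
      congr 1
      · exact hfirst.symm
      · apply List.map_congr_left
        intro i _
        simp only [Function.comp_apply, Nat.succ_eq_add_one]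
        rw [hdropsplit i]
    · have hcond : ¬ ((t.length : Int) + 1 = (W : Int)) := by
        intro h; exact hc (by exact_mod_cast h)
      rw [core, if_neg hcond, ih _ _ (by simp; omega)]
      have h1 : (t ++ [p]).length + rest.length + 1 - W
              = t.length + (p :: rest).length + 1 - W := by simp; omega
      have h2 : (t ++ [p]) ++ rest = t ++ p :: rest := by simp
      rw [h1, h2]

theorem A_closed (data : List Int) (w : Int) (hw : 1 ≤ w) :
    rolling_sum data w =
      (List.range (data.length + 1 - w.toNat)).map
        (fun i => ((data.drop i).take w.toNat).sum) := by
  have h2 := core_char w.toNat (by omega) data [] [] (by simp; omega)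
  rw [rolling_sum,
      show (([], []) : List Int × List (List Int)) = ([], sufs []) from rfl,
      foldA, show w = (w.toNat : Int) from by omega]
  simp only [Int.toNat_natCast]
  rw [h2]
  simp

-- running prefix sums starting from s
def pscan (s : Int) : List Int → List Int
  | [] => []
  | x :: xs => (s + x) :: pscan (s + x) xs

theorem prefix_fold (l : List Int) : ∀ (acc : List Int) (s : Int),
    l.foldl (fun acc x => acc ++ [PySem.List.pyGetD acc (-1) 0 + x]) (acc ++ [s])
      = acc ++ [s] ++ pscan s l := by
  induction l with
  | nil => intro acc s; simp [pscan]
  | cons x xs ih =>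
    intro acc s
    simp only [List.foldl_cons, PySem.List.pyGetD_neg_one_append_singleton, pscan]
    rw [List.append_assoc acc [s]]
    rw [show acc ++ ([s] ++ [s + x]) = (acc ++ [s]) ++ [s + x] by simp]
    rw [ih (acc ++ [s]) (s + x)]
    simp

theorem pscan_eq (l : List Int) : ∀ (s : Int),
    pscan s l = (List.range l.length).map (fun i => s + (l.take (i + 1)).sum) := by
  induction l with
  | nil => intro s; simp [pscan]
  | cons x xs ih =>
    intro s
    simp only [pscan, ih (s + x), List.length_cons, List.range_succ_eq_map,
      List.map_cons, List.map_map]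
    congr 1
    · simp
    · apply List.map_congr_left
      intro i _
      simp [List.take_succ_cons]
      ring

theorem prefix_char (data : List Int) :
    data.foldl (fun acc x => acc ++ [PySem.List.pyGetD acc (-1) 0 + x]) [0]
      = (List.range (data.length + 1)).map (fun i => (data.take i).sum) := by
  have h := prefix_fold data [] 0
  simp only [List.nil_append] at h
  rw [h, pscan_eq, List.range_succ_eq_map]
  simp [List.map_map]

theorem B_closed (data : List Int) (w : Int) (hw : 1 ≤ w)
    (hn : w ≤ (data.length : Int)) :
    rolling_sum_alt data w =
      (List.range (data.length + 1 - w.toNat)).map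
        (fun i => ((data.drop i).take w.toNat).sum) := by
  rw [rolling_sum_alt, if_neg (by omega)]
  rw [prefix_char]
  rw [PySem.List.pyRange_one]
  have hN : ((data.length : Int) - w + 1 - 0).toNat = data.length + 1 - w.toNat := by omega
  rw [hN, List.map_map]
  apply List.map_congr_left
  intro k hk
  rw [List.mem_range] at hk
  have hkW : k + w.toNat ≤ data.length := by omega
  have hget : ∀ (j : Nat), j ≤ data.length →
      PySem.List.pyGetD
        ((List.range (data.length + 1)).map (fun i => (data.take i).sum)) (j : Int) 0
        = (data.take j).sum := by
    intro j hj
    rw [PySem.List.pyGetD_natCast]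
    rw [List.getD_eq_getElem _ _ (by simpa using by omega)]
    simp
  simp only [Function.comp_apply, zero_add]
  rw [show ((k : Int) + w) = ((k + w.toNat : Nat) : Int) from by omega,
      hget _ hkW, hget _ (by omega), List.take_add, List.sum_append]
  omega

-- ===== VERDICT (by name: the statement is the Claim_ definition above) =====
theorem rolling_sum_spec : Claim_equal_rolling_sum := by
  intro data w _
  unfold Spec_rolling_sum
  by_cases hw : 1 ≤ w
  · by_cases hn : w ≤ (data.length : Int)
    · rw [A_closed data w hw, B_closed data w hw hn]
    · have hz : data.length + 1 - w.toNat = 0 := by omega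
      rw [A_closed data w hw, rolling_sum_alt, if_pos (by omega), hz]
      simp
  · rw [rolling_sum, rolling_sum_alt, if_pos (by omega)]
    rw [show (([], []) : List Int × List (List Int)) = ([], sufs []) from rfl,
        foldA, core_neg w (by omega)]
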